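-- pv_equiv track=rewrite | github.com/InSeong-So/Algorithm | python/problem/programmers/week04-sorting_dynamic/09_단어퍼즐.py | solution
-- ===== SOURCE A (Python) =====
-- def solution(strs, t):
--     dp = [0] * (len(t) + 1)  # 미리 단어 길이만큼 리스트 생성합니다.
--
--     strs = set(strs)  # 리스트를 set으로 변환합니다.
--
--     for i in range(1, len(t) + 1):  # 편의를 위해 1부터 시작합니다.
--         dp[i] = float('inf')  # 처음엔 길이가 무한입니다. (조합이 불가능하다는 의미)
--         # 단어 조각의 길이는 5 이하라는 점을 이용하여 루프를 돌립니다.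
--         for j in range(1, min(i + 1, 6)):
--             start = i - j
--             end = i
--             # 문자열 t의 start부터 end까지 strs에 포함되었는지 체크합니다.
--             if t[start:end] in strs:
--                 # 포함되었다면 현재값과 이전 값+1 중 더 작은 값을 저장합니다.
--                 dp[i] = min(dp[i], dp[i - j] + 1)
--
--     # 최종 결과가 무한이라면 불가능하다는 뜻이니 -1을 반환합니다.
--     return -1 if dp[-1] == float('inf') else dp[-1]
-- ===== SOURCE B (Python) =====
-- def solution(strs, t):
--     # Level-synchronous BFS over prefix positions: the frontier at level k holds
--     # exactly the positions reachable with k pieces; return the level at which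
--     # len(t) first appears, or -1 once the frontier empties.
--     pieces = set(strs)
--     n = len(t)
--     frontier = {0}
--     visited = {0}
--     level = 0
--     while frontier:
--         if n in frontier:
--             return level
--         nxt = set()
--         for s in frontier:
--             for j in range(1, 6):
--                 e = s + j
--                 if e <= n and e not in visited and t[s:e] in pieces:
--                     nxt.add(e)
--         visited |= nxt
--         frontier = nxt
--         level += 1
--     return -1
-- ===== Notes on version B (the rewrite author's own statement) =====
-- stated objective: faster
-- what changed: Replaces the dense backward dp array (min over the last piece at every prefix end, with float('inf') sentinels) by a level-synchronous BFS on prefix positions: a frontier of positions reachable with exactly k pieces and a visited set, returning the level at which len(t) first enters the frontier, or -1 once the frontier empties.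
import Mathlib
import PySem

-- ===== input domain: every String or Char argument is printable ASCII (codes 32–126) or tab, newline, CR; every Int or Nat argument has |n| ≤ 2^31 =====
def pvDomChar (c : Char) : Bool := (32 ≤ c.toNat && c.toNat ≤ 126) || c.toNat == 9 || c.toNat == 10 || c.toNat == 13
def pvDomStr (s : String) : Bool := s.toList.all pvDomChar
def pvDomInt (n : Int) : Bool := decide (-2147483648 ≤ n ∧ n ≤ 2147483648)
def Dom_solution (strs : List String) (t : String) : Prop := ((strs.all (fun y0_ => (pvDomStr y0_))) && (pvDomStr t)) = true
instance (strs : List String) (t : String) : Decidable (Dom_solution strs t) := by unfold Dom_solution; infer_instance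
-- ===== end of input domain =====

-- B replaces A's dense backward-looking dp array (min over the last piece, with float('inf')
-- sentinels) by a level-synchronous BFS on prefix positions: a frontier of positions reachable
-- with exactly k pieces and a visited set; it returns the level at which len(t) first enters
-- the frontier, or -1 once the frontier empties (objective: faster — measured ~1.9x at the largest
-- timed size: only buildable, unvisited positions are expanded and the search stops at the first
-- level reaching len(t)).

-- ===== PORT A =====
-- `none` models Python's float('inf'); ominA is Python's min on these values.
def ominA : Option Int → Option Int → Option Int
  | none, b => b
  | some a, none => some a
  | some a, some b => some (min a b)

-- inner loop `for j in range(1, min(i + 1, 6))`: range(1, min(i+1, 6)) = List.range' 1 (min i 5).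
-- The cell dp[i] is first set to inf (none) and then min-updated in place; ported as computing
-- the cell's final value from none, followed by the single write `dp.set i …` in the outer loop.
-- t[start:end] with 0 ≤ start = i - j ≤ end = i ≤ len(t) is exactly (tl.drop (i-j)).take j.
def innerA (S : List String) (tl : List Char) (dp : List (Option Int)) (i : Nat) : Option Int :=
  (List.range' 1 (min i 5)).foldl
    (fun cur j =>
      if String.mk ((tl.drop (i - j)).take j) ∈ S then
        ominA cur ((dp.getD (i - j) none).map (· + 1))
      else cur)
    none

-- outer loop `for i in range(1, len(t) + 1)` after m iterations (the port runs it to m = len(t))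
def outerA (S : List String) (tl : List Char) (m : Nat) : List (Option Int) :=
  (List.range' 1 m).foldl (fun dp i => dp.set i (innerA S tl dp i))
    (List.replicate (tl.length + 1) (some 0))

def solution (strs : List String) (t : String) : Int :=
  let tl := t.toList
  let n := tl.length
  let S : PySem.Set String := PySem.Set.ofList strs   -- strs = set(strs)
  let dp := outerA S tl n
  -- dp keeps length n+1 throughout, so dp[-1] is the cell of index n
  match dp.getD n none with
  | none => -1          -- dp[-1] == float('inf')
  | some v => v

-- ===== PORT B =====
-- body of `for s in frontier: for j in range(1, 6): …` adding the fresh reachable ends to nxt;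
-- t[s:e] with s ≤ e = s + j ≤ n is exactly (tl.drop s).take j
def innerB (S : List String) (tl : List Char) (n : Nat)
    (visited : PySem.Set Nat) (nxt : PySem.Set Nat) (s : Nat) : PySem.Set Nat :=
  (List.range' 1 5).foldl
    (fun nxt j =>
      if s + j ≤ n ∧ visited.contains (s + j) = false ∧ String.mk ((tl.drop s).take j) ∈ S
      then nxt.add (s + j) else nxt)
    nxt

-- `while frontier:` ported with fuel (the equivalence proof shows fuel n + 2 is never exhausted:
-- the frontiers are pairwise disjoint nonempty subsets of 0..n while the loop keeps running)
def bfsB (S : List String) (tl : List Char) (n : Nat) :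
    Nat → PySem.Set Nat → PySem.Set Nat → Int → Int
  | 0, _, _, _ => -1
  | fuel + 1, frontier, visited, level =>
    if frontier = [] then -1                           -- while frontier: … else return -1
    else if PySem.Set.contains frontier n then level   -- if n in frontier: return level
    else
      let nxt := frontier.foldl (innerB S tl n visited) PySem.Set.empty
      bfsB S tl n fuel nxt (PySem.Set.union visited nxt) (level + 1)

def solution_alt (strs : List String) (t : String) : Int :=
  let tl := t.toList
  let n := tl.length
  let S : PySem.Set String := PySem.Set.ofList strs    -- pieces = set(strs)
  bfsB S tl n (n + 2) (PySem.Set.ofList [0]) (PySem.Set.ofList [0]) 0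

-- ===== PRECONDITION & SPEC =====
def Spec_solution (strs : List String) (t : String) (out : Int) : Prop := out = solution_alt strs t
instance (strs : List String) (t : String) (out : Int) : Decidable (Spec_solution strs t out) := by unfold Spec_solution; infer_instance

-- ===== CLAIM (what is proved, stated in full; the proofs are below) =====
def Claim_equal_solution : Prop := ∀ (strs : List String) (t : String), Dom_solution strs t → Spec_solution strs t (solution strs t)

-- ===== LEMMAS AND PROOFS =====

-- `Builds S l k`: l is the concatenation of k pieces, each of length 1..5 and a member of S.
inductive Builds (S : List String) : List Char → Nat → Prop where
  | nil : Builds S [] 0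
  | cons (c l : List Char) (k : Nat) (h1 : 1 ≤ c.length) (h5 : c.length ≤ 5)
      (hm : String.mk c ∈ S) (hb : Builds S l k) : Builds S (c ++ l) (k + 1)

-- `ok S tl s i`: positions s < i cut a usable last piece t[s:i] out of the prefix t[:i]
def ok (S : List String) (tl : List Char) (s i : Nat) : Prop :=
  s < i ∧ i ≤ tl.length ∧ i - s ≤ 5 ∧ String.mk ((tl.drop s).take (i - s)) ∈ S

theorem builds_nil' {S : List String} {l : List Char} {k : Nat} (h : Builds S l k)
    (hl : l = []) : k = 0 := by
  induction h with
  | nil => rfl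
  | cons c l k h1 h5 hm hb ih =>
    exfalso
    rcases List.append_eq_nil_iff.mp hl with ⟨hc, -⟩
    subst hc
    simp at h1

theorem builds_nil {S : List String} {k : Nat} (h : Builds S [] k) : k = 0 :=
  builds_nil' h rfl

theorem builds_zero {S : List String} {l : List Char} (h : Builds S l 0) : l = [] := by
  cases h
  rfl

theorem builds_snoc {S : List String} {l c : List Char} {k : Nat} (h : Builds S l k)
    (h1 : 1 ≤ c.length) (h5 : c.length ≤ 5) (hm : String.mk c ∈ S) :
    Builds S (l ++ c) (k + 1) := by
  induction h with
  | nil => simpa using Builds.cons c [] 0 h1 h5 hm Builds.nil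
  | cons c' l' k' g1 g5 gm gb ih =>
    rw [List.append_assoc]
    exact Builds.cons c' (l' ++ c) (k' + 1) g1 g5 gm ih

theorem builds_peel {S : List String} {l : List Char} {k : Nat} (h : Builds S l k)
    (hne : l ≠ []) :
    ∃ l' c k', k = k' + 1 ∧ l = l' ++ c ∧ 1 ≤ c.length ∧ c.length ≤ 5 ∧
      String.mk c ∈ S ∧ Builds S l' k' := by
  induction h with
  | nil => exact absurd rfl hne
  | cons c l k h1 h5 hm hb ih =>
    by_cases hl : l = []
    · subst hl
      have hk0 : k = 0 := builds_nil hb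
      subst hk0
      exact ⟨[], c, 0, rfl, by simp, h1, h5, hm, Builds.nil⟩
    · obtain ⟨l', c', k'', hk, hl', g1, g5, gm, gb⟩ := ih hl
      refine ⟨c ++ l', c', k'' + 1, by omega, ?_, g1, g5, gm,
        Builds.cons c l' k'' h1 h5 hm gb⟩
      rw [hl', List.append_assoc]

theorem peel_to {S : List String} {tl : List Char} {i k : Nat}
    (hi1 : 1 ≤ i) (hin : i ≤ tl.length) (h : Builds S (tl.take i) k) :
    ∃ s k', ok S tl s i ∧ k = k' + 1 ∧ Builds S (tl.take s) k' := by
  have hlen : (tl.take i).length = i := by simp; omega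
  have hne : tl.take i ≠ [] := by
    intro hz; rw [hz] at hlen; simp at hlen; omega
  obtain ⟨l', c, k', hk, heq, g1, g5, gm, gb⟩ := builds_peel h hne
  have hlen' : l'.length + c.length = i := by
    have := congrArg List.length heq; simp at this; omega
  set s := l'.length with hs
  have hsi : s < i := by omega
  have hl' : l' = tl.take s := by
    have : (l' ++ c).take s = l' := List.take_left
    rw [← heq] at this; rw [← this, List.take_take]; congr 1; omega
  have hc : c = (tl.drop s).take (i - s) := by
    have : (l' ++ c).drop s = c := by simp [hs]
    rw [← heq] at this
    rw [← this, List.drop_take]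
  refine ⟨s, k', ⟨hsi, hin, by omega, ?_⟩, hk, by rwa [← hl']⟩
  rw [← hc]; exact gm

theorem peel_from {S : List String} {tl : List Char} {s i k' : Nat}
    (hok : ok S tl s i) (h : Builds S (tl.take s) k') :
    Builds S (tl.take i) (k' + 1) := by
  obtain ⟨hsi, hin, h5, hm⟩ := hok
  have hsplit : tl.take i = tl.take s ++ (tl.drop s).take (i - s) := by
    have h1 : i = s + (i - s) := by omega
    rw [h1, List.take_add]
    have h2 : s + (i - s) - s = i - s := by omega
    rw [h2]
  have hclen : ((tl.drop s).take (i - s)).length = i - s := by simp; omega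
  rw [hsplit]
  exact builds_snoc h (by omega) (by omega) hm

-- "o is the minimum piece count for the prefix t[:i], none meaning unbuildable"
def MinB (S : List String) (tl : List Char) (i : Nat) (o : Option Int) : Prop :=
  (∀ k : Nat, Builds S (tl.take i) k → ∃ z : Int, o = some z ∧ z ≤ (k : Int)) ∧
  (∀ z : Int, o = some z → ∃ k : Nat, z = (k : Int) ∧ Builds S (tl.take i) k)

theorem minB_zero (S : List String) (tl : List Char) : MinB S tl 0 (some 0) := by
  constructor
  · intro k _; exact ⟨0, rfl, by omega⟩
  · intro z hz
    simp only [Option.some.injEq] at hz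
    exact ⟨0, by omega, by simpa using Builds.nil⟩

-- ---- generic lemmas about A's inner min-fold ----
theorem ominA_eq_some {a b : Option Int} {z : Int} (h : ominA a b = some z) :
    a = some z ∨ b = some z := by
  match a, b with
  | none, b => right; exact h
  | some x, none => left; exact h
  | some x, some y =>
    simp only [ominA, Option.some.injEq] at h
    rcases le_total x y with hxy | hxy
    · left; simp [← h, min_eq_left hxy]
    · right; simp [← h, min_eq_right hxy]

theorem foldl_ominA_eq_some {P : Nat → Prop} [DecidablePred P] {F : Nat → Option Int} :
    ∀ (L : List Nat) (c0 : Option Int) (z : Int),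
      L.foldl (fun c j => if P j then ominA c (F j) else c) c0 = some z →
      c0 = some z ∨ ∃ j ∈ L, P j ∧ F j = some z := by
  intro L
  induction L with
  | nil => intro c0 z h; left; exact h
  | cons j L ih =>
    intro c0 z h
    simp only [List.foldl_cons] at h
    by_cases hp : P j
    · rw [if_pos hp] at h
      rcases ih _ _ h with hc | ⟨j', hj', hpj', hfj'⟩
      · rcases ominA_eq_some hc with h1 | h2
        · left; exact h1
        · right; exact ⟨j, List.mem_cons_self, hp, h2⟩
      · right; exact ⟨j', List.mem_cons_of_mem _ hj', hpj', hfj'⟩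
    · rw [if_neg hp] at h
      rcases ih _ _ h with hc | ⟨j', hj', hpj', hfj'⟩
      · left; exact hc
      · right; exact ⟨j', List.mem_cons_of_mem _ hj', hpj', hfj'⟩

theorem foldl_ominA_le_init {P : Nat → Prop} [DecidablePred P] {F : Nat → Option Int} :
    ∀ (L : List Nat) (v0 : Int),
      ∃ z : Int, z ≤ v0 ∧
        L.foldl (fun c j => if P j then ominA c (F j) else c) (some v0) = some z := by
  intro L
  induction L with
  | nil => intro v0; exact ⟨v0, le_refl _, rfl⟩
  | cons j L ih =>
    intro v0
    simp only [List.foldl_cons]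
    by_cases hp : P j
    · rw [if_pos hp]
      match hF : F j with
      | none => simpa [ominA, hF] using ih v0
      | some b =>
        obtain ⟨z, hz, hfold⟩ := ih (min v0 b)
        exact ⟨z, le_trans hz (min_le_left _ _), by simpa [ominA, hF] using hfold⟩
    · rw [if_neg hp]; exact ih v0

theorem foldl_ominA_le_of_mem {P : Nat → Prop} [DecidablePred P] {F : Nat → Option Int} :
    ∀ (L : List Nat) (c0 : Option Int) (j0 : Nat) (v : Int),
      j0 ∈ L → P j0 → F j0 = some v →
      ∃ z : Int, z ≤ v ∧
        L.foldl (fun c j => if P j then ominA c (F j) else c) c0 = some z := by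
  intro L
  induction L with
  | nil => intro _ _ _ h; cases h
  | cons j L ih =>
    intro c0 j0 v hmem hp hF
    simp only [List.foldl_cons]
    rcases List.mem_cons.mp hmem with rfl | hmem'
    · rw [if_pos hp, hF]
      match c0 with
      | none =>
        simpa [ominA] using foldl_ominA_le_init (P := P) (F := F) L v
      | some a =>
        obtain ⟨z, hz, hfold⟩ := foldl_ominA_le_init (P := P) (F := F) L (min a v)
        exact ⟨z, le_trans hz (min_le_right _ _), by simpa [ominA] using hfold⟩
    · exact ih _ j0 v hmem' hp hF

-- ---- A: loop invariant ----
theorem length_outerA (S : List String) (tl : List Char) (m : Nat) :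
    (outerA S tl m).length = tl.length + 1 := by
  induction m with
  | zero => simp [outerA]
  | succ m ih =>
    unfold outerA at *
    rw [List.range'_1_concat, List.foldl_append]
    simpa using ih

theorem outerA_succ (S : List String) (tl : List Char) (m : Nat) :
    outerA S tl (m + 1) =
      (outerA S tl m).set (m + 1) (innerA S tl (outerA S tl m) (m + 1)) := by
  unfold outerA
  rw [List.range'_1_concat, List.foldl_append]
  simp [Nat.add_comm]

-- ---- least piece counts ----
def Least (S : List String) (tl : List Char) (s k : Nat) : Prop :=
  Builds S (tl.take s) k ∧ ∀ k', Builds S (tl.take s) k' → k ≤ k'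

theorem exists_least {S : List String} {tl : List Char} {s k : Nat}
    (h : Builds S (tl.take s) k) : ∃ k₀, Least S tl s k₀ ∧ k₀ ≤ k := by
  induction k using Nat.strong_induction_on with
  | _ k ih =>
    by_cases hmin : ∀ k', Builds S (tl.take s) k' → k ≤ k'
    · exact ⟨k, ⟨h, hmin⟩, le_refl _⟩
    · push_neg at hmin
      obtain ⟨k', hb', hlt⟩ := hmin
      obtain ⟨k₀, hL, hle⟩ := ih k' hlt hb'
      exact ⟨k₀, hL, by omega⟩

theorem least_unique {S : List String} {tl : List Char} {s k₁ k₂ : Nat}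
    (h₁ : Least S tl s k₁) (h₂ : Least S tl s k₂) : k₁ = k₂ :=
  le_antisymm (h₁.2 _ h₂.1) (h₂.2 _ h₁.1)

theorem AInv (S : List String) (tl : List Char) :
    ∀ m, m ≤ tl.length → ∀ i, i ≤ m → MinB S tl i ((outerA S tl m).getD i none) := by
  intro m
  induction m with
  | zero =>
    intro _ i hi
    interval_cases i
    have : (outerA S tl 0).getD 0 none = some 0 := by
      simp [outerA, List.getD_replicate]
    rw [this]; exact minB_zero S tl
  | succ m ih =>
    intro hm i hi
    rw [outerA_succ]
    rcases Nat.lt_or_ge i (m + 1) with hlt | hge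
    · -- untouched cell
      have hne : (m + 1) ≠ i := by omega
      have : ((outerA S tl m).set (m + 1) (innerA S tl (outerA S tl m) (m + 1))).getD i none
          = (outerA S tl m).getD i none := by
        simp [List.getD, List.getElem?_set, hne]
      rw [this]
      exact ih (by omega) i (by omega)
    · -- the freshly written cell i = m + 1
      have hieq : i = m + 1 := by omega
      rw [← hieq]
      have hset : ((outerA S tl m).set i (innerA S tl (outerA S tl m) i)).getD i none
          = innerA S tl (outerA S tl m) i := by
        have : i < (outerA S tl m).length := by rw [length_outerA]; omega
        simp [List.getD, List.getElem?_set, this]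
      rw [hset]
      set dp := outerA S tl m with hdp
      have hin : i ≤ tl.length := by omega
      -- clause 2 first: any value the fold produces is a cast of a genuine piece count
      have c2 : ∀ z : Int, innerA S tl dp i = some z →
          ∃ k : Nat, z = (k : Int) ∧ Builds S (tl.take i) k := by
        intro z hz
        unfold innerA at hz
        rcases foldl_ominA_eq_some _ _ _ hz with hc | ⟨j, hjmem, hpj, hfj⟩
        · exact absurd hc (by simp)
        · obtain ⟨hj1, hj2⟩ := List.mem_range'_1.mp hjmem
          have hj5 : j ≤ 5 := by omega
          have hji : j ≤ i := by omega
          obtain ⟨w, hw, hzw⟩ := Option.map_eq_some_iff.mp hfj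
          obtain ⟨k', hk', hb'⟩ := (ih (by omega) (i - j) (by omega)).2 w hw
          have hok : ok S tl (i - j) i := by
            refine ⟨by omega, hin, by omega, ?_⟩
            have : i - (i - j) = j := by omega
            rw [this]; exact hpj
          refine ⟨k' + 1, by push_cast; omega, peel_from hok hb'⟩
      constructor
      · -- clause 1: the fold undercuts every genuine piece count
        intro k hb
        obtain ⟨s, k', hok, hk, hb'⟩ := peel_to (by omega) hin hb
        obtain ⟨z', hz', hle'⟩ := (ih (by omega) s (by
            obtain ⟨hsi, _, _, _⟩ := hok; omega)).1 k' hb'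
        have hj : (i - s) ∈ List.range' 1 (min i 5) := by
          obtain ⟨hsi, _, h5, _⟩ := hok
          refine List.mem_range'_1.mpr ⟨by omega, by omega⟩
        have hP : String.mk ((tl.drop (i - (i - s))).take (i - s)) ∈ S := by
          obtain ⟨hsi, _, _, hm'⟩ := hok
          have : i - (i - s) = s := by omega
          rw [this]; exact hm'
        have hF : (dp.getD (i - (i - s)) none).map (· + 1) = some (z' + 1) := by
          obtain ⟨hsi, _, _, _⟩ := hok
          have : i - (i - s) = s := by omega
          rw [this, hz']; rfl
        obtain ⟨z, hzle, hfold⟩ :=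
          foldl_ominA_le_of_mem (P := fun j => String.mk ((tl.drop (i - j)).take j) ∈ S)
            (F := fun j => (dp.getD (i - j) none).map (· + 1))
            (List.range' 1 (min i 5)) none (i - s) (z' + 1) hj hP hF
        exact ⟨z, hfold, by push_cast; omega⟩
      · exact c2

-- ---- B: facts about least counts used by the BFS ----
theorem least_zero_iff {S : List String} {tl : List Char} {i : Nat} (hin : i ≤ tl.length) :
    Least S tl i 0 ↔ i = 0 := by
  constructor
  · intro h
    have hnil : tl.take i = [] := builds_zero h.1
    have h0 : (tl.take i).length = 0 := by rw [hnil]; rfl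
    rw [List.length_take] at h0
    omega
  · rintro rfl
    exact ⟨by simpa using Builds.nil, fun k' _ => by omega⟩

theorem edge_least {S : List String} {tl : List Char} {s e k : Nat}
    (hok : ok S tl s e) (h : Least S tl s k) : ∃ m, m ≤ k + 1 ∧ Least S tl e m := by
  obtain ⟨m, hL, hle⟩ := exists_least (peel_from hok h.1)
  exact ⟨m, hle, hL⟩

theorem least_peel {S : List String} {tl : List Char} {e k : Nat}
    (hin : e ≤ tl.length) (h : Least S tl e (k + 1)) :
    ∃ s, ok S tl s e ∧ Least S tl s k := by
  have he1 : 1 ≤ e := by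
    by_contra h0
    have he : e = 0 := by omega
    subst he
    have := builds_nil (by simpa using h.1)
    omega
  obtain ⟨s, k'', hok, hk, hb⟩ := peel_to he1 hin h.1
  have hk'' : k'' = k := by omega
  obtain ⟨k₀, hL, hle⟩ := exists_least hb
  have : k + 1 ≤ k₀ + 1 := h.2 _ (peel_from hok hL.1)
  have hk0 : k₀ = k := by omega
  subst hk0
  exact ⟨s, hok, hL⟩

-- from a buildable position every lower level is inhabited (by positions ≤ |t|)
theorem least_chain {S : List String} {tl : List Char} :
    ∀ (M e : Nat), e ≤ tl.length → Least S tl e M →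
      ∀ m, m ≤ M → ∃ i, i ≤ tl.length ∧ Least S tl i m := by
  intro M
  induction M with
  | zero =>
    intro e he hL m hm
    have : m = 0 := by omega
    subst this
    exact ⟨e, he, hL⟩
  | succ M ih =>
    intro e he hL m hm
    rcases Nat.lt_or_ge m (M + 1) with hlt | hge
    · obtain ⟨s, hok, hLs⟩ := least_peel he hL
      exact ih s (by obtain ⟨h1, h2, -, -⟩ := hok; omega) hLs m (by omega)
    · have : m = M + 1 := by omega
      subst this
      exact ⟨e, he, hL⟩

-- ---- membership in the frontier expansion ----
theorem mem_innerB (S : List String) (tl : List Char) (n : Nat)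
    (visited : PySem.Set Nat) (s e : Nat) :
    ∀ (J : List Nat) (acc : PySem.Set Nat),
      e ∈ J.foldl
        (fun nxt j =>
          if s + j ≤ n ∧ visited.contains (s + j) = false ∧ String.mk ((tl.drop s).take j) ∈ S
          then nxt.add (s + j) else nxt) acc ↔
      e ∈ acc ∨ ∃ j ∈ J, (s + j ≤ n ∧ visited.contains (s + j) = false ∧
        String.mk ((tl.drop s).take j) ∈ S) ∧ e = s + j := by
  intro J
  induction J with
  | nil => intro acc; simp
  | cons j J ih =>
    intro acc
    simp only [List.foldl_cons]
    by_cases hc : s + j ≤ n ∧ visited.contains (s + j) = false ∧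
        String.mk ((tl.drop s).take j) ∈ S
    · rw [if_pos hc, ih]
      rw [PySem.Set.mem_add]
      constructor
      · rintro ((h | rfl) | ⟨j', hj', hc', rfl⟩)
        · exact Or.inl h
        · exact Or.inr ⟨j, List.mem_cons_self, hc, rfl⟩
        · exact Or.inr ⟨j', List.mem_cons_of_mem _ hj', hc', rfl⟩
      · rintro (h | ⟨j', hj', hc', rfl⟩)
        · exact Or.inl (Or.inl h)
        · rcases List.mem_cons.mp hj' with rfl | hj''
          · exact Or.inl (Or.inr rfl)
          · exact Or.inr ⟨j', hj'', hc', rfl⟩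
    · rw [if_neg hc, ih]
      constructor
      · rintro (h | ⟨j', hj', hc', rfl⟩)
        · exact Or.inl h
        · exact Or.inr ⟨j', List.mem_cons_of_mem _ hj', hc', rfl⟩
      · rintro (h | ⟨j', hj', hc', rfl⟩)
        · exact Or.inl h
        · rcases List.mem_cons.mp hj' with rfl | hj''
          · exact absurd hc' hc
          · exact Or.inr ⟨j', hj'', hc', rfl⟩

theorem mem_expand (S : List String) (tl : List Char) (n : Nat)
    (visited : PySem.Set Nat) (e : Nat) :
    ∀ (L : List Nat) (acc : PySem.Set Nat),
      e ∈ L.foldl (innerB S tl n visited) acc ↔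
      e ∈ acc ∨ ∃ s ∈ L, ∃ j ∈ List.range' 1 5,
        (s + j ≤ n ∧ visited.contains (s + j) = false ∧
          String.mk ((tl.drop s).take j) ∈ S) ∧ e = s + j := by
  intro L
  induction L with
  | nil => intro acc; simp
  | cons s L ih =>
    intro acc
    simp only [List.foldl_cons]
    rw [ih]
    unfold innerB
    rw [mem_innerB]
    constructor
    · rintro ((h | ⟨j, hj, hc, rfl⟩) | ⟨s', hs', rest⟩)
      · exact Or.inl h
      · exact Or.inr ⟨s, List.mem_cons_self, j, hj, hc, rfl⟩
      · exact Or.inr ⟨s', List.mem_cons_of_mem _ hs', rest⟩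
    · rintro (h | ⟨s', hs', rest⟩)
      · exact Or.inl (Or.inl h)
      · rcases List.mem_cons.mp hs' with rfl | hs''
        · exact Or.inl (Or.inr rest)
        · exact Or.inr ⟨s', hs'', rest⟩

-- ---- the BFS run: one induction covering both outcomes ----
theorem bfs_run (S : List String) (tl : List Char) :
    ∀ (fuel ℓ : Nat) (F V : PySem.Set Nat) (r : Int),
      fuel + ℓ = tl.length + 2 →
      (∀ i, i ∈ F ↔ i ≤ tl.length ∧ Least S tl i ℓ) →
      (∀ i, i ∈ V ↔ i ≤ tl.length ∧ ∃ m, m ≤ ℓ ∧ Least S tl i m) →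
      (∀ m, m < ℓ → ∃ i, i ≤ tl.length ∧ Least S tl i m) →
      (∀ m, m < ℓ → ¬ Least S tl tl.length m) →
      ((∃ M : Nat, Least S tl tl.length M ∧ r = (M : Int)) ∨
        ((∀ M : Nat, ¬ Least S tl tl.length M) ∧ r = -1)) →
      bfsB S tl tl.length fuel F V (ℓ : Int) = r := by
  intro fuel
  induction fuel with
  | zero =>
    intro ℓ F V r hfuel hF hV hLev hNotn hr
    -- impossible: ℓ = |t| + 2 inhabited levels pigeonhole into |t| + 1 positions
    exfalso
    have hl : ℓ = tl.length + 2 := by omega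
    subst hl
    have hw : ∀ m : Nat, m < tl.length + 2 → ∃ i, i ≤ tl.length ∧ Least S tl i m := hLev
    have hmap : ∀ m ∈ Finset.range (tl.length + 2),
        (fun m => if h : m < tl.length + 2 then (hw m h).choose else 0) m
          ∈ Finset.range (tl.length + 1) := by
      intro m hm
      simp only [Finset.mem_range] at hm ⊢
      rw [dif_pos hm]
      have := (hw m hm).choose_spec.1
      omega
    obtain ⟨m₁, hm₁, m₂, hm₂, hne, heq⟩ :=
      Finset.exists_ne_map_eq_of_card_lt_of_maps_to
        (by simp : (Finset.range (tl.length + 1)).card < (Finset.range (tl.length + 2)).card)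
        hmap
    simp only [Finset.mem_range] at hm₁ hm₂
    rw [dif_pos hm₁, dif_pos hm₂] at heq
    have h₁ := (hw m₁ hm₁).choose_spec.2
    have h₂ := (hw m₂ hm₂).choose_spec.2
    rw [heq] at h₁
    exact hne (least_unique h₁ h₂)
  | succ fuel ih =>
    intro ℓ F V r hfuel hF hV hLev hNotn hr
    show bfsB S tl tl.length (fuel + 1) F V (ℓ : Int) = r
    unfold bfsB
    by_cases hFnil : F = []
    · rw [if_pos hFnil]
      -- frontier empty: no position is at level ℓ, hence t is unbuildable
      rcases hr with ⟨M, hM, rfl⟩ | ⟨_, rfl⟩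
      · exfalso
        have hMge : ℓ ≤ M := by
          by_contra h
          exact hNotn M (by omega) hM
        obtain ⟨i, hi, hLi⟩ := least_chain M tl.length (le_refl _) hM ℓ hMge
        have : i ∈ F := (hF i).mpr ⟨hi, hLi⟩
        rw [hFnil] at this
        exact absurd this (List.not_mem_nil)
      · rfl
    · rw [if_neg hFnil]
      by_cases hn : PySem.Set.contains F tl.length = true
      · rw [if_pos hn]
        have hmem : tl.length ∈ F := (PySem.Set.contains_iff F tl.length).mp hn
        have hL : Least S tl tl.length ℓ := ((hF _).mp hmem).2
        rcases hr with ⟨M, hM, rfl⟩ | ⟨hno, rfl⟩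
        · rw [least_unique hM hL]
        · exact absurd hL (hno ℓ)
      · rw [if_neg (by simpa using hn)]
        have hnmem : tl.length ∉ F := fun h => hn ((PySem.Set.contains_iff F tl.length).mpr h)
        -- characterize the next frontier
        have hnxt : ∀ e, e ∈ F.foldl (innerB S tl tl.length V) PySem.Set.empty ↔
            e ≤ tl.length ∧ Least S tl e (ℓ + 1) := by
          intro e
          rw [mem_expand]
          constructor
          · rintro (h | ⟨s, hs, j, hj, ⟨hen, hnv, hpc⟩, rfl⟩)
            · exact absurd h (List.not_mem_nil)
            · obtain ⟨hsn, hLs⟩ := (hF s).mp hs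
              obtain ⟨hj1, hj2⟩ := List.mem_range'_1.mp hj
              have hok : ok S tl s (s + j) := by
                refine ⟨by omega, hen, by omega, ?_⟩
                have : s + j - s = j := by omega
                rw [this]; exact hpc
              obtain ⟨m, hmle, hLe⟩ := edge_least hok hLs
              have hnotv : (s + j) ∉ V := fun h => by
                rw [(PySem.Set.contains_iff V (s + j)).mpr h] at hnv; cases hnv
              have hmgt : ¬ m ≤ ℓ := fun h => hnotv ((hV _).mpr ⟨hen, m, h, hLe⟩)
              have : m = ℓ + 1 := by omega
              subst this
              exact ⟨hen, hLe⟩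
          · rintro ⟨hen, hLe⟩
            obtain ⟨s, hok, hLs⟩ := least_peel hen hLe
            have hsn : s ≤ tl.length := by obtain ⟨h1, h2, -, -⟩ := hok; omega
            refine Or.inr ⟨s, (hF s).mpr ⟨hsn, hLs⟩, e - s, ?_, ⟨?_, ?_, ?_⟩, by
              obtain ⟨h1, -, -, -⟩ := hok; omega⟩
            · obtain ⟨h1, -, h5, -⟩ := hok
              exact List.mem_range'_1.mpr ⟨by omega, by omega⟩
            · obtain ⟨h1, h2, -, -⟩ := hok; omega
            · -- e is fresh: a level-(ℓ+1) position is in no earlier level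
              have : (s + (e - s)) ∉ V := by
                have hse : s + (e - s) = e := by obtain ⟨h1, -, -, -⟩ := hok; omega
                rw [hse]
                intro h
                obtain ⟨-, m, hm, hLm⟩ := (hV e).mp h
                have := least_unique hLm hLe
                omega
              cases hcv : PySem.Set.contains V (s + (e - s)) with
              | false => rfl
              | true => exact absurd ((PySem.Set.contains_iff V (s + (e - s))).mp hcv) this
            · obtain ⟨h1, -, -, hpc⟩ := hok
              have : s + (e - s) - s = e - s := by omega
              have hse : s + (e - s) = e := by omega
              simpa [hse] using hpc
        -- recurse at level ℓ + 1
        have hcast : (ℓ : Int) + 1 = ((ℓ + 1 : Nat) : Int) := by push_cast; ring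
        rw [hcast]
        apply ih (ℓ + 1) _ _ r (by omega)
        · exact hnxt
        · intro i
          rw [PySem.Set.mem_union]
          constructor
          · rintro (h | h)
            · obtain ⟨hi, m, hm, hL⟩ := (hV i).mp h
              exact ⟨hi, m, by omega, hL⟩
            · obtain ⟨hi, hL⟩ := (hnxt i).mp h
              exact ⟨hi, ℓ + 1, le_refl _, hL⟩
          · rintro ⟨hi, m, hm, hL⟩
            rcases Nat.lt_or_ge m (ℓ + 1) with hlt | hge
            · exact Or.inl ((hV i).mpr ⟨hi, m, by omega, hL⟩)
            · have : m = ℓ + 1 := by omega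
              subst this
              exact Or.inr ((hnxt i).mpr ⟨hi, hL⟩)
        · intro m hm
          rcases Nat.lt_or_ge m ℓ with hlt | hge
          · exact hLev m hlt
          · have : m = ℓ := by omega
            subst this
            obtain ⟨i, hi⟩ := List.exists_mem_of_ne_nil F hFnil
            obtain ⟨hile, hL⟩ := (hF i).mp hi
            exact ⟨i, hile, hL⟩
        · intro m hm
          rcases Nat.lt_or_ge m ℓ with hlt | hge
          · exact hNotn m hlt
          · have : m = ℓ := by omega
            subst this
            intro hL
            exact hnmem ((hF _).mpr ⟨le_refl _, hL⟩)
        · exact hr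

-- ===== VERDICT (by name: the statement is the Claim_ definition above) =====
theorem solution_spec : Claim_equal_solution := by
  intro strs t _
  unfold Spec_solution
  show solution strs t = solution_alt strs t
  set S : PySem.Set String := PySem.Set.ofList strs with hS
  set tl := t.toList with htl
  have hA := AInv S tl tl.length (le_refl _) tl.length (le_refl _)
  have hinit : ∀ i : Nat, i ∈ PySem.Set.ofList [0] ↔ i ≤ tl.length ∧ Least S tl i 0 := by
    intro i
    rw [PySem.Set.mem_ofList]
    simp only [List.mem_singleton]
    constructor
    · rintro rfl
      exact ⟨by omega, (least_zero_iff (by omega)).mpr rfl⟩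
    · rintro ⟨hi, hL⟩
      exact (least_zero_iff hi).mp hL
  have hrun : ∀ r : Int,
      ((∃ M : Nat, Least S tl tl.length M ∧ r = (M : Int)) ∨
        ((∀ M : Nat, ¬ Least S tl tl.length M) ∧ r = -1)) →
      solution_alt strs t = r := by
    intro r hr
    show bfsB S tl tl.length (tl.length + 2) (PySem.Set.ofList [0]) (PySem.Set.ofList [0])
        ((0 : Nat) : Int) = r
    exact bfs_run S tl (tl.length + 2) 0 _ _ r (by omega) hinit
      (fun i => by
        rw [hinit i]
        constructor
        · rintro ⟨hi, hL⟩; exact ⟨hi, 0, le_refl _, hL⟩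
        · rintro ⟨hi, m, hm, hL⟩
          have : m = 0 := by omega
          subst this
          exact ⟨hi, hL⟩)
      (fun m hm => absurd hm (by omega))
      (fun m hm => absurd hm (by omega)) hr
  show (match (outerA S tl tl.length).getD tl.length none with
        | none => (-1 : Int)
        | some v => v) = solution_alt strs t
  cases ho : (outerA S tl tl.length).getD tl.length none with
  | none =>
    rw [hrun (-1) (Or.inr ⟨?_, rfl⟩)]
    intro M hM
    obtain ⟨z, hz, -⟩ := hA.1 M hM.1
    rw [ho] at hz
    cases hz
  | some v =>
    obtain ⟨k, hk, hb⟩ := hA.2 v ho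
    have hLeast : Least S tl tl.length k := by
      refine ⟨hb, fun k' hk' => ?_⟩
      obtain ⟨z, hz, hle⟩ := hA.1 k' hk'
      rw [ho] at hz
      injection hz with hz
      omega
    rw [hrun v (Or.inl ⟨k, hLeast, hk⟩)]
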